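-- pv_equiv track=rewrite | github.com/averniere/ensae-prog23v2 | delivery_network/main.py | new_get_power
-- ===== SOURCE A (Python) =====
-- def new_get_power(parents, depths, src,dest):
--     power=0
--     depth_src=depths[src]
--     depth_dest=depths[dest]
--     n1=0
--     n2=0
--     if depth_src>depth_dest:
--         n1=src
--         n2=dest
--     else:
--         n1=dest
--         n2=src
--     res=depths[n2]
--     while depths[n1]!=res: #tant que les profondeurs des noeuds dans le graphe sont différentes
--         power=max(parents[n1][1],power) #on met à jour la puissance car l'on est en train de parcourir le chemin entre les noeuds
--         n1=parents[n1][0] #on remonte dans l'arbre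
--     while n1!=n2: #lorsque les profondeurs sont égales mais que les noeuds sont différents
--         power=max(parents[n1][1],power) #mise à jour de la puissance
--         power=max(parents[n2][1],power) #mise à jour de la puissance
--         n1=parents[n1][0] #on remonte simultanément dans le graphe
--         n2=parents[n2][0]
--     return power
-- ===== SOURCE B (Python) =====
-- def new_get_power(parents, depths, src, dest):
--     if src == dest:
--         return 0
--     # index the src->root path: best[a] = max edge weight from src up to ancestor a
--     best = {src: 0}
--     n = src
--     m = 0
--     while depths[n] != 0:
--         m = max(m, parents[n][1])
--         n = parents[n][0]
--         best[n] = m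
--     # walk dest upward until hitting a node on the indexed path (the LCA)
--     n = dest
--     m = 0
--     while n not in best:
--         m = max(m, parents[n][1])
--         n = parents[n][0]
--     return max(best[n], m)
-- ===== Notes on version B (the rewrite author's own statement) =====
-- stated objective: alternative
-- what changed: Replaces A's depth-equalize-then-lockstep meeting walk by building a dict from each ancestor of src to the max edge weight from src up to it, then walking dest upward with its own running max until it hits a node in that dict (the LCA), returning max of the two accumulated maxima.
-- outside the precondition, e.g. on new_get_power({9: (10, 2)}, {9: 1, 10: -3}, 9, 10): A returns 2, B raises KeyError; on new_get_power({0: (2, 5), 1: (2, 7), 2: (0, 1)}, {0: 0, 1: 0, 2: 1}, 0, 1): A returns 7, B returns 7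
import Mathlib
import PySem

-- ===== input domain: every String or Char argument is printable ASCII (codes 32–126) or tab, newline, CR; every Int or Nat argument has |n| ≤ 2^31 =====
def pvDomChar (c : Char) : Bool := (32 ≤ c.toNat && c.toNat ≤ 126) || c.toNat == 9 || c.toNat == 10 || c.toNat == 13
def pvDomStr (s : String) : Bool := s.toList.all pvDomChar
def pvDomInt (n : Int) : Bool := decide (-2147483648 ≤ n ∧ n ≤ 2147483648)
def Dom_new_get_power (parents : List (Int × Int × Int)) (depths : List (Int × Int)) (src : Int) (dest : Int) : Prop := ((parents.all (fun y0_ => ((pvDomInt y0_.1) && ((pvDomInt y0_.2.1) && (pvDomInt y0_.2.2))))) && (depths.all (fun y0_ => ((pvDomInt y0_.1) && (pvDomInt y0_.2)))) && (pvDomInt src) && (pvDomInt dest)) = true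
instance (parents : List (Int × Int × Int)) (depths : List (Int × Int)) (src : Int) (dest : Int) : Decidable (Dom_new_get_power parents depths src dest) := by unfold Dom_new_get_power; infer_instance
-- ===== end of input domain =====

-- B replaces A's depth-equalize-then-lockstep LCA walk by an index (dict) of src's ancestor path
-- with running maxima, then a single upward walk from dest until it hits that index (alternative
-- decomposition, same asymptotic cost).


-- ===== PORT A =====

-- depths / parents are Python dicts (association lists here): key lookup, first match
def dget (depths : List (Int × Int)) (k : Int) : Option Int := (PySem.Dict.mk depths).get? k
def pget (parents : List (Int × Int × Int)) (k : Int) : Option (Int × Int) := (PySem.Dict.mk parents).get? k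

-- fuel bound used by both ports' while-loops (a totality guard only; under Pre_ every loop
-- makes strictly fewer steps than this bound)
def pvFuel (depths : List (Int × Int)) : Nat :=
  depths.foldl (fun a q => max a q.2.toNat) 0 + 1

-- while depths[n1] != res: power = max(parents[n1][1], power); n1 = parents[n1][0]
def aLoop1 (parents : List (Int × Int × Int)) (depths : List (Int × Int)) (res : Int) :
    Nat → Int → Int → Int × Int
  | 0, n1, power => (n1, power)
  | fuel + 1, n1, power =>
    match dget depths n1 with
    | none => (n1, power)
    | some d =>
      if d = res then (n1, power)
      else
        match pget parents n1 with
        | none => (n1, power)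
        | some t => aLoop1 parents depths res fuel t.1 (max t.2 power)

-- while n1 != n2: power = max(parents[n1][1], power); power = max(parents[n2][1], power); ...
def aLoop2 (parents : List (Int × Int × Int)) : Nat → Int → Int → Int → Int
  | 0, _, _, power => power
  | fuel + 1, n1, n2, power =>
    if n1 = n2 then power
    else
      match pget parents n1, pget parents n2 with
      | some t1, some t2 => aLoop2 parents fuel t1.1 t2.1 (max t2.2 (max t1.2 power))
      | _, _ => power

def new_get_power (parents : List (Int × Int × Int)) (depths : List (Int × Int)) (src : Int) (dest : Int) : Int :=
  match dget depths src, dget depths dest with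
  | some depth_src, some depth_dest =>
    let nn : Int × Int := if depth_dest < depth_src then (src, dest) else (dest, src)
    match dget depths nn.2 with
    | some res =>
      let s1 := aLoop1 parents depths res (pvFuel depths) nn.1 0
      aLoop2 parents (pvFuel depths) s1.1 nn.2 s1.2
    | none => 0
  | _, _ => 0

-- ===== PORT B =====

-- while depths[n] != 0: m = max(m, parents[n][1]); n = parents[n][0]; best[n] = m
def bLoop1 (parents : List (Int × Int × Int)) (depths : List (Int × Int)) :
    Nat → Int → Int → PySem.Dict Int Int → PySem.Dict Int Int × Int × Int
  | 0, n, m, best => (best, n, m)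
  | fuel + 1, n, m, best =>
    match dget depths n with
    | none => (best, n, m)
    | some d =>
      if d = 0 then (best, n, m)
      else
        match pget parents n with
        | none => (best, n, m)
        | some t =>
          let m' := max m t.2
          bLoop1 parents depths fuel t.1 m' (best.insert t.1 m')

-- while n not in best: m = max(m, parents[n][1]); n = parents[n][0]
def bLoop2 (parents : List (Int × Int × Int)) (best : PySem.Dict Int Int) :
    Nat → Int → Int → Int × Int
  | 0, n, m => (n, m)
  | fuel + 1, n, m =>
    if best.contains n then (n, m)
    else
      match pget parents n with
      | none => (n, m)
      | some t => bLoop2 parents best fuel t.1 (max m t.2)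

def new_get_power_alt (parents : List (Int × Int × Int)) (depths : List (Int × Int)) (src : Int) (dest : Int) : Int :=
  if src = dest then 0
  else
    let s := bLoop1 parents depths (pvFuel depths) src 0 ((PySem.Dict.empty).insert src 0)
    let r := bLoop2 parents s.1 (pvFuel depths) dest 0
    max (s.1.getD r.1 0) r.2

-- ===== PRECONDITION & SPEC =====

-- Pre_ admits every trivial src = dest query (src a key of depths: A walks nothing), and otherwise
-- queries whose dicts encode a rooted tree: distinct keys, src and dest present, depths ≥ 0 with a
-- unique depth-0 root, and every deeper node's parent one level up.  Outside this shape A's upward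
-- walks may diverge, raise KeyError, or return accidental values of merged garbage chains, and B's
-- walk may diverge.
def Pre_new_get_power (parents : List (Int × Int × Int)) (depths : List (Int × Int)) (src : Int) (dest : Int) : Prop :=
  (src = dest ∧ (∃ p ∈ depths, p.1 = src)) ∨
  ((depths.map (fun x => x.1)).Nodup ∧ (parents.map (fun x => x.1)).Nodup ∧
    (∃ p ∈ depths, p.1 = src) ∧ (∃ p ∈ depths, p.1 = dest) ∧
    (∀ p ∈ depths, 0 ≤ p.2 ∧ (p.2 ≠ 0 →
      ∃ q ∈ parents, q.1 = p.1 ∧ ∃ r ∈ depths, r.1 = q.2.1 ∧ r.2 = p.2 - 1)) ∧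
    (∀ p ∈ depths, ∀ r ∈ depths, p.2 = 0 → r.2 = 0 → p.1 = r.1))
instance (parents : List (Int × Int × Int)) (depths : List (Int × Int)) (src : Int) (dest : Int) : Decidable (Pre_new_get_power parents depths src dest) := by unfold Pre_new_get_power; infer_instance

def pvWitness_new_get_power : (List (Int × Int × Int)) × (List (Int × Int)) × Int × Int :=
  ([(0, 0, 0), (1, 0, 3), (2, 1, 5)], [(0, 0), (1, 1), (2, 2)], 2, 1)

def Spec_new_get_power (parents : List (Int × Int × Int)) (depths : List (Int × Int)) (src : Int) (dest : Int) (out : Int) : Prop := out = new_get_power_alt parents depths src dest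
instance (parents : List (Int × Int × Int)) (depths : List (Int × Int)) (src : Int) (dest : Int) (out : Int) : Decidable (Spec_new_get_power parents depths src dest out) := by unfold Spec_new_get_power; infer_instance

-- ===== CLAIM (what is proved, stated in full; the proofs are below) =====
def Claim_equal_new_get_power : Prop := ∀ (parents : List (Int × Int × Int)) (depths : List (Int × Int)) (src : Int) (dest : Int), Dom_new_get_power parents depths src dest → Pre_new_get_power parents depths src dest → Spec_new_get_power parents depths src dest (new_get_power parents depths src dest)

-- ===== LEMMAS AND PROOFS =====

-- total views of the two dicts, and the tree context (the rooted-tree part of Pre_)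
def parF (parents : List (Int × Int × Int)) (n : Int) : Int := ((pget parents n).getD (0, 0)).1
def wtF (parents : List (Int × Int × Int)) (n : Int) : Int := ((pget parents n).getD (0, 0)).2
def depF (depths : List (Int × Int)) (n : Int) : Int := (dget depths n).getD 0
def Valid (depths : List (Int × Int)) (n : Int) : Prop := (dget depths n).isSome = true

def Ctx (parents : List (Int × Int × Int)) (depths : List (Int × Int)) : Prop :=
  (depths.map (fun x => x.1)).Nodup ∧ (parents.map (fun x => x.1)).Nodup ∧
  (∀ p ∈ depths, 0 ≤ p.2 ∧ (p.2 ≠ 0 →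
    ∃ q ∈ parents, q.1 = p.1 ∧ ∃ r ∈ depths, r.1 = q.2.1 ∧ r.2 = p.2 - 1)) ∧
  (∀ p ∈ depths, ∀ r ∈ depths, p.2 = 0 → r.2 = 0 → p.1 = r.1)

-- max accumulated along k parent steps from n, starting from p (accumulation order of A)
def mfold (parents : List (Int × Int × Int)) : Nat → Int → Int → Int
  | 0, _, p => p
  | k + 1, n, p => mfold parents k (parF parents n) (max (wtF parents n) p)

-- same, accumulation order of B
def mfoldB (parents : List (Int × Int × Int)) : Nat → Int → Int → Int
  | 0, _, p => p
  | k + 1, n, p => mfoldB parents k (parF parents n) (max p (wtF parents n))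

-- lockstep accumulation of A's second loop
def mfold2 (parents : List (Int × Int × Int)) : Nat → Int → Int → Int → Int
  | 0, _, _, p => p
  | k + 1, n1, n2, p => mfold2 parents k (parF parents n1) (parF parents n2)
      (max (wtF parents n2) (max (wtF parents n1) p))

-- the dict built by B's first loop
def chainIns (parents : List (Int × Int × Int)) : Nat → Int → Int → PySem.Dict Int Int → PySem.Dict Int Int
  | 0, _, _, best => best
  | k + 1, n, m, best =>
    chainIns parents k (parF parents n) (max m (wtF parents n))
      (best.insert (parF parents n) (max m (wtF parents n)))

lemma valid_dget {depths : List (Int × Int)} {n : Int} (hn : Valid depths n) :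
    dget depths n = some (depF depths n) := by
  obtain ⟨d, hd⟩ := Option.isSome_iff_exists.mp hn
  rw [depF, hd]
  rfl

lemma pget_eq {parents : List (Int × Int × Int)} {n : Int} (hp : (pget parents n).isSome = true) :
    pget parents n = some (parF parents n, wtF parents n) := by
  obtain ⟨t, ht⟩ := Option.isSome_iff_exists.mp hp
  rw [parF, wtF, ht]
  rfl

lemma mem_of_dget {depths : List (Int × Int)} {n d : Int} (h : dget depths n = some d) :
    (n, d) ∈ depths := by
  have h' : (PySem.Dict.mk depths).get? n = some d := h
  exact PySem.Dict.mem_items_of_get?_eq_some _ h'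

lemma dget_of_mem {depths : List (Int × Int)} {n d : Int}
    (hnd : (depths.map (fun x => x.1)).Nodup) (h : (n, d) ∈ depths) :
    dget depths n = some d :=
  PySem.Dict.get?_of_mem_items (PySem.Dict.mk depths) h (by rw [PySem.Dict.keys_mk]; exact hnd)

lemma mem_valid {depths : List (Int × Int)} {n : Int} (h : ∃ p ∈ depths, p.1 = n) :
    Valid depths n := by
  obtain ⟨p, hp, hp1⟩ := h
  rw [Valid, Option.isSome_iff_ne_none]
  intro hc
  rw [dget, PySem.Dict.get?_eq_none_iff_not_mem_keys, PySem.Dict.keys_mk] at hc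
  exact hc (List.mem_map.mpr ⟨p, hp, hp1⟩)

lemma ctx_dep_nonneg {parents : List (Int × Int × Int)} {depths : List (Int × Int)} {n : Int}
    (h : Ctx parents depths) (hn : Valid depths n) : 0 ≤ depF depths n :=
  (h.2.2.1 _ (mem_of_dget (valid_dget hn))).1

lemma ctx_step {parents : List (Int × Int × Int)} {depths : List (Int × Int)} {n : Int}
    (h : Ctx parents depths) (hn : Valid depths n) (hd : depF depths n ≠ 0) :
    (pget parents n).isSome = true ∧ Valid depths (parF parents n) ∧
      depF depths (parF parents n) = depF depths n - 1 := by
  have hm := mem_of_dget (valid_dget hn)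
  obtain ⟨q, hqmem, hq1, r, hrmem, hr1, hr2⟩ := (h.2.2.1 _ hm).2 hd
  obtain ⟨qk, qv⟩ := q
  obtain ⟨rk, rv⟩ := r
  simp only at hq1 hr1 hr2
  rw [hq1] at hqmem
  rw [hr1] at hrmem
  have hpg : pget parents n = some qv :=
    PySem.Dict.get?_of_mem_items (PySem.Dict.mk parents) hqmem
      (by rw [PySem.Dict.keys_mk]; exact h.2.1)
  have hpar : parF parents n = qv.1 := by rw [parF, hpg]; rfl
  have hdg : dget depths qv.1 = some rv := dget_of_mem h.1 hrmem
  refine ⟨by rw [hpg]; rfl, ?_, ?_⟩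
  · rw [Valid, hpar, hdg]; rfl
  · rw [hpar, depF, hdg]
    simpa using hr2

lemma ctx_root_unique {parents : List (Int × Int × Int)} {depths : List (Int × Int)} {x y : Int}
    (h : Ctx parents depths) (hx : Valid depths x) (hy : Valid depths y)
    (hdx : depF depths x = 0) (hdy : depF depths y = 0) : x = y := by
  have hmx := mem_of_dget (valid_dget hx)
  have hmy := mem_of_dget (valid_dget hy)
  rw [hdx] at hmx
  rw [hdy] at hmy
  exact h.2.2.2 _ hmx _ hmy rfl rfl

lemma ctx_lift {parents : List (Int × Int × Int)} {depths : List (Int × Int)}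
    (h : Ctx parents depths) :
    ∀ (k : Nat) (n : Int), Valid depths n → (k : Int) ≤ depF depths n →
      Valid depths ((parF parents)^[k] n) ∧
        depF depths ((parF parents)^[k] n) = depF depths n - k := by
  intro k
  induction k with
  | zero => intro n hn _; simp only [Function.iterate_zero_apply]; exact ⟨hn, by push_cast; ring⟩
  | succ k ih =>
    intro n hn hk
    have hd : depF depths n ≠ 0 := by omega
    obtain ⟨_, hv, hdp⟩ := ctx_step h hn hd
    have := ih (parF parents n) hv (by omega)
    rw [Function.iterate_succ_apply]
    refine ⟨this.1, ?_⟩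
    rw [this.2, hdp]; push_cast; ring

lemma ctx_chain_ne {parents : List (Int × Int × Int)} {depths : List (Int × Int)} {n : Int}
    (h : Ctx parents depths) (hn : Valid depths n) {i j : Nat}
    (hij : i < j) (hj : (j : Int) ≤ depF depths n) :
    (parF parents)^[i] n ≠ (parF parents)^[j] n := by
  intro heq
  have hi := (ctx_lift h i n hn (by omega)).2
  have hjj := (ctx_lift h j n hn hj).2
  rw [heq] at hi
  omega

lemma foldl_max_le_init : ∀ (l : List (Int × Int)) (acc : Nat),
    acc ≤ l.foldl (fun a q => max a q.2.toNat) acc := by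
  intro l
  induction l with
  | nil => intro acc; simp
  | cons x xs ih => intro acc; exact le_trans (le_max_left _ _) (ih _)

lemma mem_le_foldl_max : ∀ (l : List (Int × Int)) (acc : Nat) (p : Int × Int), p ∈ l →
    p.2.toNat ≤ l.foldl (fun a q => max a q.2.toNat) acc := by
  intro l
  induction l with
  | nil => intro _ _ hp; simp at hp
  | cons x xs ih =>
    intro acc p hp
    rcases List.mem_cons.1 hp with h | h
    · subst h; exact le_trans (le_max_right _ _) (foldl_max_le_init _ _)
    · exact ih _ _ h

lemma dep_lt_fuel {depths : List (Int × Int)} {n : Int} (hn : Valid depths n) :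
    (depF depths n).toNat < pvFuel depths := by
  have hmem : (n, depF depths n) ∈ depths := mem_of_dget (valid_dget hn)
  have := mem_le_foldl_max depths 0 _ hmem
  rw [pvFuel]
  omega

lemma mfold_comb (parents : List (Int × Int × Int)) :
    ∀ (k : Nat) (n p q : Int), mfold parents k n (max p q) = max p (mfold parents k n q) := by
  intro k
  induction k with
  | zero => intro n p q; rfl
  | succ k ih =>
    intro n p q
    show mfold parents k _ (max (wtF parents n) (max p q)) = max p (mfold parents k _ (max (wtF parents n) q))
    rw [max_left_comm, ih]

lemma le_mfold (parents : List (Int × Int × Int)) :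
    ∀ (k : Nat) (n p : Int), p ≤ mfold parents k n p := by
  intro k
  induction k with
  | zero => intro n p; exact le_refl _
  | succ k ih =>
    intro n p
    exact le_trans (le_max_right _ _) (ih (parF parents n) _)

lemma mfoldB_eq (parents : List (Int × Int × Int)) :
    ∀ (k : Nat) (n p : Int), mfoldB parents k n p = mfold parents k n p := by
  intro k
  induction k with
  | zero => intro n p; rfl
  | succ k ih =>
    intro n p
    show mfoldB parents k _ (max p (wtF parents n)) = mfold parents k _ (max (wtF parents n) p)
    rw [ih, max_comm]

lemma mfold2_eq (parents : List (Int × Int × Int)) :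
    ∀ (k : Nat) (n1 n2 p : Int),
      mfold2 parents k n1 n2 p = mfold parents k n2 (mfold parents k n1 p) := by
  intro k
  induction k with
  | zero => intro n1 n2 p; rfl
  | succ k ih =>
    intro n1 n2 p
    show mfold2 parents k _ _ (max (wtF parents n2) (max (wtF parents n1) p)) = _
    rw [ih]
    show _ = mfold parents k (parF parents n2) (max (wtF parents n2) (mfold parents k (parF parents n1) (max (wtF parents n1) p)))
    rw [← mfold_comb]

lemma mfold_add (parents : List (Int × Int × Int)) :
    ∀ (i j : Nat) (n p : Int),
      mfold parents (i + j) n p = mfold parents j ((parF parents)^[i] n) (mfold parents i n p) := by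
  intro i
  induction i with
  | zero => intro j n p; rw [Nat.zero_add]; rfl
  | succ i ih =>
    intro j n p
    have h1 : i + 1 + j = (i + j) + 1 := by omega
    rw [h1]
    show mfold parents (i + j) (parF parents n) (max (wtF parents n) p) = _
    rw [ih j (parF parents n) (max (wtF parents n) p), ← Function.iterate_succ_apply]
    rfl

-- A's first loop computes k parent steps with accumulated max, k = depth difference
lemma aLoop1_spec {parents : List (Int × Int × Int)} {depths : List (Int × Int)}
    (h : Ctx parents depths) (rd : Int) (hrd : 0 ≤ rd) :
    ∀ (k : Nat) (n p : Int) (fuel : Nat), Valid depths n →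
      depF depths n = rd + k → k ≤ fuel →
      aLoop1 parents depths rd fuel n p = ((parF parents)^[k] n, mfold parents k n p) := by
  intro k
  induction k with
  | zero =>
    intro n p fuel hn hdep _
    cases fuel with
    | zero => rfl
    | succ f =>
      show aLoop1 parents depths rd (f + 1) n p = _
      rw [aLoop1, valid_dget hn]
      have h1 : depF depths n = rd := by omega
      simp [h1]
      rfl
  | succ k ih =>
    intro n p fuel hn hdep hf
    have hne : depF depths n ≠ 0 := by omega
    obtain ⟨hps, hv, hdp⟩ := ctx_step h hn hne
    cases fuel with
    | zero => omega
    | succ f =>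
      show aLoop1 parents depths rd (f + 1) n p = _
      rw [aLoop1, valid_dget hn]
      have hneq : ¬ depF depths n = rd := by omega
      simp only [hneq, if_false]
      rw [pget_eq hps]
      have hrec := ih (parF parents n) (max (wtF parents n) p) f hv (by omega) (by omega)
      show aLoop1 parents depths rd f (parF parents n, wtF parents n).1
        (max (parF parents n, wtF parents n).2 p) = _
      rw [hrec, Function.iterate_succ_apply]
      rfl

-- A's second loop: lockstep walk to the first meeting point
lemma aLoop2_spec {parents : List (Int × Int × Int)} {depths : List (Int × Int)}
    (h : Ctx parents depths) :
    ∀ (k : Nat) (n1 n2 p : Int) (fuel : Nat), Valid depths n1 → Valid depths n2 →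
      depF depths n1 = depF depths n2 → (k : Int) ≤ depF depths n1 →
      (parF parents)^[k] n1 = (parF parents)^[k] n2 →
      (∀ j, j < k → (parF parents)^[j] n1 ≠ (parF parents)^[j] n2) →
      k ≤ fuel →
      aLoop2 parents fuel n1 n2 p = mfold2 parents k n1 n2 p := by
  intro k
  induction k with
  | zero =>
    intro n1 n2 p fuel _ _ _ _ hmeet _ _
    simp only [Function.iterate_zero_apply] at hmeet
    cases fuel with
    | zero => rfl
    | succ f => show aLoop2 parents (f + 1) n1 n2 p = _; rw [aLoop2]; simp [hmeet]; rfl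
  | succ k ih =>
    intro n1 n2 p fuel h1 h2 hdep hk hmeet hmin hf
    have hne : n1 ≠ n2 := by
      have := hmin 0 (by omega); simpa using this
    have hd1 : depF depths n1 ≠ 0 := by
      intro h0
      exact hne (ctx_root_unique h h1 h2 h0 (by omega))
    have hd2 : depF depths n2 ≠ 0 := by omega
    obtain ⟨hps1, hv1, hp1⟩ := ctx_step h h1 hd1
    obtain ⟨hps2, hv2, hp2⟩ := ctx_step h h2 hd2
    cases fuel with
    | zero => omega
    | succ f =>
      show aLoop2 parents (f + 1) n1 n2 p = _
      rw [aLoop2]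
      simp only [if_neg hne]
      rw [pget_eq hps1, pget_eq hps2]
      have hrec := ih (parF parents n1) (parF parents n2)
        (max (wtF parents n2) (max (wtF parents n1) p)) f hv1 hv2
        (by omega) (by omega)
        (by rw [← Function.iterate_succ_apply, ← Function.iterate_succ_apply]; exact hmeet)
        (by intro j hj
            have := hmin (j + 1) (by omega)
            rw [Function.iterate_succ_apply, Function.iterate_succ_apply] at this
            exact this)
        (by omega)
      show aLoop2 parents f (parF parents n1, wtF parents n1).1 (parF parents n2, wtF parents n2).1
        (max (parF parents n2, wtF parents n2).2 (max (parF parents n1, wtF parents n1).2 p)) = _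
      rw [hrec]
      rfl

-- B's first loop: walks to the root, building chainIns and the accumulated max
lemma bLoop1_spec {parents : List (Int × Int × Int)} {depths : List (Int × Int)}
    (h : Ctx parents depths) :
    ∀ (k : Nat) (n m : Int) (best : PySem.Dict Int Int) (fuel : Nat), Valid depths n →
      depF depths n = k → k ≤ fuel →
      bLoop1 parents depths fuel n m best =
        (chainIns parents k n m best, (parF parents)^[k] n, mfoldB parents k n m) := by
  intro k
  induction k with
  | zero =>
    intro n m best fuel hn hdep _
    cases fuel with
    | zero => rfl
    | succ f =>
      show bLoop1 parents depths (f + 1) n m best = _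
      rw [bLoop1, valid_dget hn]
      have h0 : depF depths n = 0 := by simpa using hdep
      simp [h0]
      exact ⟨rfl, rfl⟩
  | succ k ih =>
    intro n m best fuel hn hdep hf
    have hne : depF depths n ≠ 0 := by omega
    obtain ⟨hps, hv, hdp⟩ := ctx_step h hn hne
    cases fuel with
    | zero => omega
    | succ f =>
      show bLoop1 parents depths (f + 1) n m best = _
      rw [bLoop1, valid_dget hn]
      simp only [hne, if_false]
      rw [pget_eq hps]
      have hrec := ih (parF parents n) (max m (wtF parents n))
        (best.insert (parF parents n) (max m (wtF parents n))) f hv (by omega) (by omega)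
      show bLoop1 parents depths f (parF parents n, wtF parents n).1
        (max m (parF parents n, wtF parents n).2)
        (best.insert (parF parents n, wtF parents n).1 (max m (parF parents n, wtF parents n).2)) = _
      rw [hrec, Function.iterate_succ_apply]
      rfl

-- the dict built by B's first loop: src's ancestors paired with the path maxima, in order
lemma chainIns_items {parents : List (Int × Int × Int)} {depths : List (Int × Int)}
    (h : Ctx parents depths) :
    ∀ (k : Nat) (n m : Int) (best : PySem.Dict Int Int), Valid depths n →
      (k : Int) ≤ depF depths n →
      (∀ i, 1 ≤ i → i ≤ k → best.contains ((parF parents)^[i] n) = false) →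
      (chainIns parents k n m best).items =
        best.items ++ (List.range k).map (fun i => ((parF parents)^[i + 1] n, mfoldB parents (i + 1) n m)) := by
  intro k
  induction k with
  | zero => intro n m best _ _ _; simp; rfl
  | succ k ih =>
    intro n m best hn hk hfresh
    have hne : depF depths n ≠ 0 := by
      have := ctx_dep_nonneg h hn; omega
    obtain ⟨_, hv, hdp⟩ := ctx_step h hn hne
    show (chainIns parents k (parF parents n) (max m (wtF parents n))
        (best.insert (parF parents n) (max m (wtF parents n)))).items = _
    have hfresh1 : best.contains ((parF parents)^[1] n) = false := hfresh 1 le_rfl (by omega)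
    rw [Function.iterate_one] at hfresh1
    have hrec := ih (parF parents n) (max m (wtF parents n))
      (best.insert (parF parents n) (max m (wtF parents n))) hv (by omega) ?_
    · rw [hrec, PySem.Dict.items_insert_of_not_contains _ _ hfresh1,
        List.append_assoc, List.range_succ_eq_map, List.map_cons, List.map_map, List.singleton_append]
      congr 1
    · intro i hi1 hik
      rw [PySem.Dict.contains_insert]
      have h2 : best.contains ((parF parents)^[i + 1] n) = false := hfresh (i + 1) (by omega) (by omega)
      have hnei : (parF parents)^[1] n ≠ (parF parents)^[i + 1] n := by
        apply ctx_chain_ne h hn (by omega)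
        push_cast; omega
      rw [Function.iterate_one] at hnei
      have hit : (parF parents)^[i] (parF parents n) = (parF parents)^[i + 1] n :=
        (Function.iterate_succ_apply (parF parents) i n).symm
      rw [hit, h2, Bool.or_false]
      exact beq_eq_false_iff_ne.mpr (Ne.symm hnei)

-- B's second loop: walks dest upward to the first node already indexed
lemma bLoop2_spec {parents : List (Int × Int × Int)} {depths : List (Int × Int)}
    (h : Ctx parents depths) (D : PySem.Dict Int Int)
    (hroot : ∀ x, Valid depths x → depF depths x = 0 → D.contains x = true) :
    ∀ (j : Nat) (n m : Int) (fuel : Nat), Valid depths n →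
      D.contains ((parF parents)^[j] n) = true →
      (∀ j', j' < j → D.contains ((parF parents)^[j'] n) = false) →
      j ≤ fuel →
      bLoop2 parents D fuel n m = ((parF parents)^[j] n, mfoldB parents j n m) := by
  intro j
  induction j with
  | zero =>
    intro n m fuel _ hstop _ _
    simp only [Function.iterate_zero_apply] at hstop
    cases fuel with
    | zero => rfl
    | succ f =>
      show bLoop2 parents D (f + 1) n m = _
      rw [bLoop2]
      simp [hstop]
      rfl
  | succ j ih =>
    intro n m fuel hn hstop hmin hf
    have hcn : D.contains n = false := by
      have := hmin 0 (by omega); simpa using this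
    have hne : depF depths n ≠ 0 := by
      intro h0
      rw [hroot n hn h0] at hcn; exact Bool.false_ne_true hcn.symm
    obtain ⟨hps, hv, hdp⟩ := ctx_step h hn hne
    cases fuel with
    | zero => omega
    | succ f =>
      show bLoop2 parents D (f + 1) n m = _
      rw [bLoop2]
      simp only [hcn]
      rw [pget_eq hps]
      have hrec := ih (parF parents n) (max m (wtF parents n)) f hv
        (by rw [← Function.iterate_succ_apply]; exact hstop)
        (by intro j' hj'
            have := hmin (j' + 1) (by omega)
            rw [Function.iterate_succ_apply] at this
            exact this)
        (by omega)
      show bLoop2 parents D f (parF parents n, wtF parents n).1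
        (max m (parF parents n, wtF parents n).2) = _
      rw [hrec, Function.iterate_succ_apply]
      rfl

-- A's whole computation, characterized by the first lockstep meeting index
lemma A_value {parents : List (Int × Int × Int)} {depths : List (Int × Int)}
    (h : Ctx parents depths) (a b : Int) (Va : Valid depths a) (Vb : Valid depths b)
    (hab : depF depths b ≤ depF depths a) :
    ∃ k : Nat, (k : Int) ≤ depF depths b ∧
      (parF parents)^[(depF depths a - depF depths b).toNat + k] a = (parF parents)^[k] b ∧
      (∀ j, j < k → (parF parents)^[(depF depths a - depF depths b).toNat + j] a ≠ (parF parents)^[j] b) ∧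
      aLoop2 parents (pvFuel depths)
          (aLoop1 parents depths (depF depths b) (pvFuel depths) a 0).1 b
          (aLoop1 parents depths (depF depths b) (pvFuel depths) a 0).2
        = max (mfold parents ((depF depths a - depF depths b).toNat + k) a 0) (mfold parents k b 0) := by
  have hb0 : 0 ≤ depF depths b := ctx_dep_nonneg h Vb
  have ha0 : 0 ≤ depF depths a := ctx_dep_nonneg h Va
  set Δ : Nat := (depF depths a - depF depths b).toNat with hΔ
  have hΔI : (Δ : Int) = depF depths a - depF depths b := by omega
  have hL1 := aLoop1_spec h (depF depths b) hb0 Δ a 0 (pvFuel depths) Va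
      (by omega) (by have := dep_lt_fuel Va; omega)
  rw [hL1]
  have hlift := ctx_lift h Δ a Va (by omega)
  set a' : Int := (parF parents)^[Δ] a with ha'
  have hda' : depF depths a' = depF depths b := by
    have := hlift.2; omega
  have hva' : Valid depths a' := hlift.1
  -- the lockstep meeting index exists: both chains reach the unique root
  have hroot : (parF parents)^[(depF depths b).toNat] a' = (parF parents)^[(depF depths b).toNat] b := by
    have h1 := ctx_lift h (depF depths b).toNat a' hva' (by omega)
    have h2 := ctx_lift h (depF depths b).toNat b Vb (by omega)
    exact ctx_root_unique h h1.1 h2.1 (by omega) (by omega)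
  have hex : ∃ k : Nat, (parF parents)^[k] a' = (parF parents)^[k] b := ⟨_, hroot⟩
  set k : Nat := Nat.find hex with hk
  have hkle : k ≤ (depF depths b).toNat := Nat.find_min' hex hroot
  have hmeet : (parF parents)^[k] a' = (parF parents)^[k] b := Nat.find_spec hex
  have hmin : ∀ j, j < k → (parF parents)^[j] a' ≠ (parF parents)^[j] b :=
    fun j hj => Nat.find_min hex hj
  have hL2 := aLoop2_spec h k a' b (mfold parents Δ a 0) (pvFuel depths)
      hva' Vb (by omega) (by omega) hmeet hmin
      (by have := dep_lt_fuel Vb; omega)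
  rw [hL2]
  refine ⟨k, by omega, ?_, ?_, ?_⟩
  · rw [Nat.add_comm Δ k, Function.iterate_add_apply]; exact hmeet
  · intro j hj
    rw [Nat.add_comm Δ j, Function.iterate_add_apply]; exact hmin j hj
  · rw [mfold2_eq, ← mfold_add]
    have hq0 : 0 ≤ mfold parents (Δ + k) a 0 := le_mfold parents _ _ 0
    have : mfold parents (Δ + k) a 0 = max (mfold parents (Δ + k) a 0) 0 := by omega
    rw [this, mfold_comb]
    have h2 : max (mfold parents (Δ + k) a 0) (0:Int) = mfold parents (Δ + k) a 0 := by omega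
    rw [h2]

-- B's whole computation, characterized by the first src-ancestor hit on dest's chain
lemma B_value {parents : List (Int × Int × Int)} {depths : List (Int × Int)}
    (h : Ctx parents depths) (src dest : Int) (Vs : Valid depths src) (Vd : Valid depths dest)
    (hsd : src ≠ dest) :
    ∃ i j : Nat, (i : Int) ≤ depF depths src ∧ (j : Int) ≤ depF depths dest ∧
      (parF parents)^[i] src = (parF parents)^[j] dest ∧
      (∀ j' i' : Nat, j' < j → (i' : Int) ≤ depF depths src →
        (parF parents)^[i'] src ≠ (parF parents)^[j'] dest) ∧
      new_get_power_alt parents depths src dest =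
        max (mfold parents i src 0) (mfold parents j dest 0) := by
  have hs0 : 0 ≤ depF depths src := ctx_dep_nonneg h Vs
  have hd0 : 0 ≤ depF depths dest := ctx_dep_nonneg h Vd
  set ds : Nat := (depF depths src).toNat with hds
  set best0 : PySem.Dict Int Int := (PySem.Dict.empty).insert src 0 with hbest0
  have hL1 := bLoop1_spec h ds src 0 best0 (pvFuel depths) Vs (by omega)
      (by have := dep_lt_fuel Vs; omega)
  set D : PySem.Dict Int Int := chainIns parents ds src 0 best0 with hD
  -- the items of the built dict: the src chain with its running maxima
  have hb0items : best0.items = [(src, 0)] := by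
    rw [hbest0, PySem.Dict.items_insert_of_not_contains _ _ (PySem.Dict.contains_empty src)]
    rfl
  have hfresh0 : ∀ i, 1 ≤ i → i ≤ ds → best0.contains ((parF parents)^[i] src) = false := by
    intro i hi1 hi2
    rw [hbest0, PySem.Dict.contains_insert]
    have hne : src ≠ (parF parents)^[i] src := by
      have := ctx_chain_ne h Vs (show 0 < i by omega) (show (i : Int) ≤ depF depths src by omega)
      simpa using this
    rw [PySem.Dict.contains_empty, Bool.or_false]
    exact beq_eq_false_iff_ne.mpr (Ne.symm hne)
  have hitems : D.items = (List.range (ds + 1)).map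
      (fun i => ((parF parents)^[i] src, mfoldB parents i src 0)) := by
    rw [hD, chainIns_items h ds src 0 best0 Vs (by omega) hfresh0, hb0items,
      List.range_succ_eq_map, List.map_cons, List.map_map]
    rfl
  have hkeys : D.keys = (List.range (ds + 1)).map (fun i => (parF parents)^[i] src) := by
    show D.items.map (fun x => x.1) = _
    rw [hitems, List.map_map]
    rfl
  have hinj : ∀ x ∈ List.range (ds + 1), ∀ y ∈ List.range (ds + 1),
      (parF parents)^[x] src = (parF parents)^[y] src → x = y := by
    intro x hx y hy hxy
    rw [List.mem_range] at hx hy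
    by_contra hne
    rcases Nat.lt_or_ge x y with hlt | hge
    · exact ctx_chain_ne h Vs hlt (by omega) hxy
    · have hlt : y < x := by omega
      exact ctx_chain_ne h Vs hlt (by omega) hxy.symm
  have hnodup : D.keys.Nodup := by
    rw [hkeys]
    exact (List.nodup_map_iff_inj_on (List.nodup_range)).mpr hinj
  have hmemkeys : ∀ x, x ∈ D.keys ↔ ∃ i, i ≤ ds ∧ (parF parents)^[i] src = x := by
    intro x
    rw [hkeys, List.mem_map]
    constructor
    · rintro ⟨i, hi, hfx⟩; exact ⟨i, by simpa [List.mem_range] using Nat.lt_succ_iff.mp (List.mem_range.mp hi), hfx⟩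
    · rintro ⟨i, hi, hfx⟩; exact ⟨i, List.mem_range.mpr (by omega), hfx⟩
  have hcont : ∀ x, D.contains x = decide (x ∈ D.keys) := fun x =>
    PySem.Dict.contains_eq_decide_mem_keys D x
  have hroot : ∀ x, Valid depths x → depF depths x = 0 → D.contains x = true := by
    intro x hx hdx
    have hlift := ctx_lift h ds src Vs (by omega)
    have hxeq : (parF parents)^[ds] src = x :=
      ctx_root_unique h hlift.1 hx (by omega) hdx
    rw [hcont]
    simp only [decide_eq_true_eq]
    exact (hmemkeys x).mpr ⟨ds, le_rfl, hxeq⟩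
  -- the first index of dest's chain that is already in the dict
  have hex : ∃ j : Nat, D.contains ((parF parents)^[j] dest) = true := by
    refine ⟨(depF depths dest).toNat, ?_⟩
    have hlift := ctx_lift h (depF depths dest).toNat dest Vd (by omega)
    exact hroot _ hlift.1 (by omega)
  set j0 : Nat := Nat.find hex with hj0
  have hj0le : j0 ≤ (depF depths dest).toNat := by
    apply Nat.find_min' hex
    have hlift := ctx_lift h (depF depths dest).toNat dest Vd (by omega)
    exact hroot _ hlift.1 (by omega)
  have hstop : D.contains ((parF parents)^[j0] dest) = true := Nat.find_spec hex
  have hmin : ∀ j', j' < j0 → D.contains ((parF parents)^[j'] dest) = false := by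
    intro j' hj'
    have := Nat.find_min hex hj'
    simpa using this
  have hL2 := bLoop2_spec h D hroot j0 dest 0 (pvFuel depths) Vd hstop hmin
      (by have := dep_lt_fuel Vd; omega)
  -- the hit node sits at some position i on src's chain
  have hc : (parF parents)^[j0] dest ∈ D.keys := by
    have := hstop; rw [hcont] at this; simpa using this
  obtain ⟨i, hile, hieq⟩ := (hmemkeys _).mp hc
  have hgetD : D.getD ((parF parents)^[j0] dest) 0 = mfoldB parents i src 0 := by
    have hmem : ((parF parents)^[i] src, mfoldB parents i src 0) ∈ D.items := by
      rw [hitems]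
      exact List.mem_map.mpr ⟨i, List.mem_range.mpr (by omega), rfl⟩
    rw [← hieq, PySem.Dict.getD_eq_get?_getD, PySem.Dict.get?_of_mem_items D hmem hnodup]
    rfl
  refine ⟨i, j0, by omega, by omega, hieq, ?_, ?_⟩
  · intro j' i' hj' hi' heq
    have : D.contains ((parF parents)^[j'] dest) = true := by
      rw [hcont]
      simp only [decide_eq_true_eq]
      exact (hmemkeys _).mpr ⟨i', by omega, heq⟩
    rw [hmin j' hj'] at this
    exact Bool.false_ne_true this
  · rw [new_get_power_alt, if_neg hsd]
    simp only []
    rw [hL1]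
    simp only []
    rw [hL2]
    simp only []
    rw [hgetD, mfoldB_eq, mfoldB_eq]

lemma aLoop1_stop {parents : List (Int × Int × Int)} {depths : List (Int × Int)}
    (res : Int) (n p : Int) (hget : dget depths n = some res) :
    aLoop1 parents depths res (pvFuel depths) n p = (n, p) := by
  show aLoop1 parents depths res ((depths.foldl (fun a q => max a q.2.toNat) 0) + 1) n p = (n, p)
  rw [aLoop1, hget]
  simp

lemma aLoop2_self {parents : List (Int × Int × Int)} {depths : List (Int × Int)}
    (n p : Int) : aLoop2 parents (pvFuel depths) n n p = p := by
  show aLoop2 parents ((depths.foldl (fun a q => max a q.2.toNat) 0) + 1) n n p = p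
  rw [aLoop2]
  simp

-- the trivial query src = dest: A walks nothing, B's guard fires; both return 0
lemma self_case (parents : List (Int × Int × Int)) (depths : List (Int × Int)) (src : Int)
    (hin : Valid depths src) :
    new_get_power parents depths src src = new_get_power_alt parents depths src src := by
  have hd := valid_dget hin
  rw [new_get_power_alt, if_pos rfl]
  rw [new_get_power, hd]
  simp only [lt_irrefl, if_false]
  rw [hd]
  show aLoop2 parents (pvFuel depths)
    (aLoop1 parents depths (depF depths src) (pvFuel depths) src 0).1 src
    (aLoop1 parents depths (depF depths src) (pvFuel depths) src 0).2 = 0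
  rw [aLoop1_stop _ _ _ hd]
  exact aLoop2_self _ _

theorem new_get_power_spec : Claim_equal_new_get_power := by
  intro parents depths src dest _ hPre
  show new_get_power parents depths src dest = new_get_power_alt parents depths src dest
  rcases hPre with ⟨hsd, hin⟩ | ⟨hnd, hnp, hms, hmd, hinv, huniq⟩
  · subst hsd
    exact self_case parents depths src (mem_valid hin)
  · have Vs : Valid depths src := mem_valid hms
    have Vd : Valid depths dest := mem_valid hmd
    have hctx : Ctx parents depths := ⟨hnd, hnp, hinv, huniq⟩
    by_cases hsd : src = dest
    · subst hsd
      exact self_case parents depths src Vs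
    obtain ⟨i, j, hi_le, hj_le, hij_eq, hij_min, hB⟩ := B_value hctx src dest Vs Vd hsd
    have hdep_i := (ctx_lift hctx i src Vs hi_le).2
    have hdep_j := (ctx_lift hctx j dest Vd hj_le).2
    have hdepeq : depF depths src - i = depF depths dest - j := by
      rw [← hdep_i, ← hdep_j, hij_eq]
    rw [hB]
    rw [new_get_power, valid_dget Vs, valid_dget Vd]
    by_cases hgt : depF depths dest < depF depths src
    · simp only [if_pos hgt, valid_dget Vd]
      obtain ⟨k, hkle, hkeq, hkmin, hA⟩ := A_value hctx src dest Vs Vd (le_of_lt hgt)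
      rw [hA]
      set Δ : Nat := (depF depths src - depF depths dest).toNat with hΔ
      have hjk : j ≤ k := by
        by_contra hc
        push Not at hc
        exact hij_min k (Δ + k) hc (by omega) hkeq
      have hkj : k ≤ j := by
        by_contra hc
        push Not at hc
        have hiΔ : i = Δ + j := by omega
        exact hkmin j hc (by rw [← hiΔ]; exact hij_eq)
      have hjeq : j = k := le_antisymm hjk hkj
      have hieq : i = Δ + k := by omega
      rw [hjeq, hieq]
    · simp only [if_neg hgt, valid_dget Vs]
      have hge : depF depths src ≤ depF depths dest := by omega
      obtain ⟨k, hkle, hkeq, hkmin, hA⟩ := A_value hctx dest src Vd Vs hge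
      rw [hA]
      set Δ : Nat := (depF depths dest - depF depths src).toNat with hΔ
      have hjk : j ≤ Δ + k := by
        by_contra hc
        push Not at hc
        exact hij_min (Δ + k) k hc (by omega) hkeq.symm
      have hki : k ≤ i := by
        by_contra hc
        push Not at hc
        have hjΔ : j = Δ + i := by omega
        exact hkmin i hc (by rw [hjΔ] at hij_eq; exact hij_eq.symm)
      have hieq : i = k := by omega
      have hjeq : j = Δ + k := by omega
      rw [hjeq, hieq, max_comm]
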